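-- pv_equiv track=rewrite | github.com/eurolinux-enterprise-linux-sources/malaga-suomi-voikko | src/common/generate_lex_common.py | get_structure
-- ===== SOURCE A (Python) =====
-- def get_structure(wordform, malaga_word_class):
-- 	needstructure = False
-- 	if malaga_word_class in [u'nimi', u'etunimi', u'sukunimi', 'paikannimi']: ispropernoun = True
-- 	else: ispropernoun = False
-- 	structstr = u', rakenne: "='
-- 	for i in range(len(wordform)):
-- 		c = wordform[i]
-- 		if c == u'-':
-- 			structstr = structstr + u"-="
-- 			needstructure = True
-- 		elif c == u'|': structstr = structstr
-- 		elif c == u'=':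
-- 			structstr = structstr + u"="
-- 			needstructure = True
-- 		elif c == u':':
-- 			structstr = structstr + u":"
-- 			needstructure = True
-- 		elif c.isupper():
-- 			structstr = structstr + u"i"
-- 			if not (ispropernoun and i == 0): needstructure = True
-- 		else: structstr = structstr + u"p"
-- 	if needstructure: return structstr + u'"'
-- 	else: return u""
-- ===== SOURCE B (Python) =====
-- def get_structure(wordform, malaga_word_class):
--     ispropernoun = malaga_word_class in (u'nimi', u'etunimi', u'sukunimi', u'paikannimi')
--     body = u''
--     for c in reversed(wordform):
--         if c == u'-':
--             body = u'-=' + body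
--         elif c == u'|':
--             pass
--         elif c == u'=':
--             body = u'=' + body
--         elif c == u':':
--             body = u':' + body
--         else:
--             body = (u'i' if c.isupper() else u'p') + body
--     checked = wordform[1:] if ispropernoun else wordform
--     if set(wordform) & set(u'-=:') or any(c.isupper() for c in checked):
--         return u', rakenne: "=' + body + u'"'
--     return u''
-- ===== Notes on version B (the rewrite author's own statement) =====
-- stated objective: alternative
-- what changed: A's single forward loop threading (accumulator, needstructure, index) is split apart: the body is built back-to-front by iterating reversed(wordform) and prepending, with no flag and no index, and the need test is computed independently as a set intersection with '-=:' plus an uppercase scan over wordform[1:] (for proper nouns) so no position bookkeeping remains.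
import Mathlib
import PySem

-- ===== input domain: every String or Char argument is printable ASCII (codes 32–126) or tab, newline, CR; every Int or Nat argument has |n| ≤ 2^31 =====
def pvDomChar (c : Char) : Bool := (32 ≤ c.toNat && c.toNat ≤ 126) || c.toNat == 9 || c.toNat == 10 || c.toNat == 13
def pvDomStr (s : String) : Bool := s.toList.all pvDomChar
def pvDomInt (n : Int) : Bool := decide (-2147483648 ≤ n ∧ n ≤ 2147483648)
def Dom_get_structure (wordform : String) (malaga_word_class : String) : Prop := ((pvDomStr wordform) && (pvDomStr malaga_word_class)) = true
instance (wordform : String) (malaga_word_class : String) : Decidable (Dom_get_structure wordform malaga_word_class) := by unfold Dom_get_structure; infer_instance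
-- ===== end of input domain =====

-- B replaces A's single forward loop (accumulator + threaded needstructure flag + index) by a
-- back-to-front prepend loop for the body and an independent need test (set intersection with
-- '-=:' plus an uppercase scan of wordform[1:] for proper nouns) — alternative decomposition.

-- ===== PORT A =====
-- A's loop body: one step per character, threading (structstr, needstructure)
def pvStepA (ispropernoun : Bool) (st : List Char × Bool) (ic : Int × Char) : List Char × Bool :=
  let i := ic.1
  let c := ic.2
  if c == '-' then (st.1 ++ ['-', '='], true)
  else if c == '|' then st
  else if c == '=' then (st.1 ++ ['='], true)
  else if c == ':' then (st.1 ++ [':'], true)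
  else if PySem.Chars.isupper c then
    (st.1 ++ ['i'], if !(ispropernoun && i == 0) then true else st.2)
  else (st.1 ++ ['p'], st.2)

def get_structure (wordform : String) (malaga_word_class : String) : String :=
  let ispropernoun : Bool :=
    malaga_word_class == "nimi" || malaga_word_class == "etunimi" ||
    malaga_word_class == "sukunimi" || malaga_word_class == "paikannimi"
  let r := (PySem.List.enumerate wordform.toList 0).foldl (pvStepA ispropernoun)
             ((", rakenne: \"=").toList, false)
  if r.2 then String.ofList (r.1 ++ ['"']) else ""

-- ===== PORT B =====
-- B's backward loop body: prepend this character's piece to the body built so far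
def pvStepB (body : List Char) (c : Char) : List Char :=
  if c == '-' then '-' :: '=' :: body
  else if c == '|' then body
  else if c == '=' then '=' :: body
  else if c == ':' then ':' :: body
  else (if PySem.Chars.isupper c then 'i' else 'p') :: body

def get_structure_alt (wordform : String) (malaga_word_class : String) : String :=
  let ispropernoun : Bool :=
    malaga_word_class == "nimi" || malaga_word_class == "etunimi" ||
    malaga_word_class == "sukunimi" || malaga_word_class == "paikannimi"
  let body := wordform.toList.reverse.foldl pvStepB []
  let checked := if ispropernoun then PySem.List.slice wordform.toList (some 1) none
                 else wordform.toList
  let need := !(PySem.Set.inter (PySem.Set.ofList wordform.toList)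
                  (PySem.Set.ofList ['-', '=', ':'])).isEmpty ||
              checked.any PySem.Chars.isupper
  if need then String.ofList ((", rakenne: \"=").toList ++ body ++ ['"']) else ""

-- ===== PRECONDITION & SPEC =====
def Spec_get_structure (wordform : String) (malaga_word_class : String) (out : String) : Prop := out = get_structure_alt wordform malaga_word_class
instance (wordform : String) (malaga_word_class : String) (out : String) : Decidable (Spec_get_structure wordform malaga_word_class out) := by unfold Spec_get_structure; infer_instance

-- ===== CLAIM (what is proved, stated in full; the proofs are below) =====
def Claim_equal_get_structure : Prop := ∀ (wordform : String) (malaga_word_class : String), Dom_get_structure wordform malaga_word_class → Spec_get_structure wordform malaga_word_class (get_structure wordform malaga_word_class)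

-- ===== LEMMAS AND PROOFS =====

-- proof-only per-character piece: pvStepB prepends exactly this
def pvPiece (c : Char) : List Char :=
  if c == '-' then ['-', '=']
  else if c == '|' then []
  else if c == '=' then ['=']
  else if c == ':' then [':']
  else if PySem.Chars.isupper c then ['i'] else ['p']

theorem pvStepB_eq (body : List Char) (c : Char) : pvStepB body c = pvPiece c ++ body := by
  simp only [pvStepB, pvPiece]
  split_ifs <;> simp

-- B's backward fold builds the concatenation of the pieces in original order
theorem pvBodyB_eq (l : List Char) :
    l.reverse.foldl pvStepB [] = (l.map pvPiece).flatten := by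
  induction l with
  | nil => simp
  | cons c t ih =>
    simp only [List.reverse_cons, List.foldl_append, List.foldl_cons, List.foldl_nil,
      ih, pvStepB_eq, List.map_cons, List.flatten_cons]

-- A's fold = (acc ++ pieces, b || special-char scan || positional uppercase scan)
theorem pvFoldA_eq (p : Bool) (l : List Char) (i : Int) (acc : List Char) (b : Bool) :
    (PySem.List.enumerate l i).foldl (pvStepA p) (acc, b) =
      (acc ++ (l.map pvPiece).flatten,
       b || l.any (fun c => c == '-' || c == '=' || c == ':') ||
         (PySem.List.enumerate l i).any
           (fun ic => PySem.Chars.isupper ic.2 && !(p && ic.1 == 0))) := by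
  induction l generalizing i acc b with
  | nil => simp [PySem.List.enumerate_nil]
  | cons c t ih =>
    rw [PySem.List.enumerate_cons, List.foldl_cons, List.any_cons, List.any_cons]
    have e1 : (c == '-') = false ∨ c = '-' := by by_cases h : c = '-' <;> simp [h]
    have e3 : (c == '=') = false ∨ c = '=' := by by_cases h : c = '=' <;> simp [h]
    have e4 : (c == ':') = false ∨ c = ':' := by by_cases h : c = ':' <;> simp [h]
    by_cases h1 : c = '-'
    · subst h1; simp [pvStepA, pvPiece, ih]
    · by_cases h2 : c = '|'
      · subst h2; simp [pvStepA, pvPiece, ih, PySem.Chars.isupper]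
      · by_cases h3 : c = '='
        · subst h3; simp [pvStepA, pvPiece, ih]
        · by_cases h4 : c = ':'
          · subst h4; simp [pvStepA, pvPiece, ih]
          · by_cases h5 : PySem.Chars.isupper c = true
            · simp only [pvStepA, pvPiece, beq_iff_eq, h1, h2, h3, h4, h5, ih, if_true,
                List.map_cons, List.flatten_cons]
              by_cases hpi : (p && i == 0) = true
              · have f1 := e1.resolve_right h1
                have f3 := e3.resolve_right h3
                have f4 := e4.resolve_right h4
                simp [hpi, f1, f3, f4]
              · simp only [hpi, Bool.not_eq_true] at *
                simp
            · simp only [pvStepA, pvPiece, beq_iff_eq, h1, h2, h3, h4, h5, ih,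
                List.map_cons, List.flatten_cons]
              have f1 := e1.resolve_right h1
              have f3 := e3.resolve_right h3
              have f4 := e4.resolve_right h4
              simp [f1, f3, f4]

-- the set-intersection test equals A's special-character scan
theorem pvInter_eq (l : List Char) :
    (!(PySem.Set.inter (PySem.Set.ofList l) (PySem.Set.ofList ['-', '=', ':'])).isEmpty) =
      l.any (fun c => c == '-' || c == '=' || c == ':') := by
  rw [Bool.eq_iff_iff]
  simp [PySem.Set.inter, List.isEmpty_eq_false_iff, List.eq_nil_iff_forall_not_mem,
    PySem.Set.mem_ofList, List.any_eq_true]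
  constructor <;> rintro ⟨x, hx, hp⟩ <;> refine ⟨x, hx, ?_⟩ <;> tauto

-- the positional uppercase scan over enumerate with indices ≥ 1 ignores the index condition
theorem pvEnumUpper_pos (p : Bool) (t : List Char) (i : Int) (hi : 1 ≤ i) :
    (PySem.List.enumerate t i).any
        (fun ic => PySem.Chars.isupper ic.2 && !(p && ic.1 == 0)) =
      t.any PySem.Chars.isupper := by
  induction t generalizing i with
  | nil => simp [PySem.List.enumerate_nil]
  | cons c t ih =>
    rw [PySem.List.enumerate_cons, List.any_cons, List.any_cons, ih (i + 1) (by omega)]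
    have : (i == 0) = false := by simp; omega
    simp [this]

-- the positional uppercase scan equals B's scan over `checked`
theorem pvEnumUpper_eq (p : Bool) (l : List Char) :
    (PySem.List.enumerate l 0).any
        (fun ic => PySem.Chars.isupper ic.2 && !(p && ic.1 == 0)) =
      (if p then PySem.List.slice l (some 1) none else l).any PySem.Chars.isupper := by
  rw [PySem.List.slice_from_one]
  cases l with
  | nil => simp [PySem.List.enumerate_nil]
  | cons c t =>
    rw [PySem.List.enumerate_cons, List.any_cons, pvEnumUpper_pos p t (0+1) (by norm_num)]
    cases p with
    | true => simp
    | false =>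
      simp only [Bool.false_and, Bool.not_false, Bool.and_true]
      simp [List.any_cons]

-- ===== VERDICT (by name: the statement is the Claim_ definition above) =====
theorem get_structure_spec : Claim_equal_get_structure := by
  intro wordform malaga_word_class _
  simp only [Spec_get_structure, get_structure, get_structure_alt, pvFoldA_eq, pvBodyB_eq,
    pvInter_eq, pvEnumUpper_eq]
  simp only [Bool.false_or, List.append_assoc]
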